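-- pv_equiv track=rewrite | github.com/achoudh5/Manipulating_Excel_Sheet | valid_ip.py | process
-- ===== SOURCE A (Python) =====
-- i = ('Hacktoberfest_Inputt.xlsx')
--
-- def process(s):
--
--     # removing delimeters and commas.
--     for idx, k in enumerate(s):
--         if k=='\n' or k==',':
--             s = s[:idx] + " " + s[idx + 1:]
--     s = s.split()
--
--     # for processing the networks like "12.34.54.67/34"
--     for index, i in enumerate(s):
--
--         # for counting the number of full stops (must be 3) before
--         # removing the slash "/" and post string.
--         count=0
--         for idx, k in enumerate(i):
--             if k==".":
--                 count+=1
--             if count==3 and k=="/":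
--                 count=-1
--                 break
--         if count==-1:
--             s[index] = s[index][:idx]
--
--     # removes everything except full stops and numbers.
--     for index, i in enumerate(s):
--         for idx, k in enumerate(i):
--             if not (k == '.' or k.isnumeric()):
--                 s[index] = s[index][:idx] + " " + s[index][idx + 1:]
--
--         s[index] = s[index].replace(" ","")
--
--     return(s)
-- ===== SOURCE B (Python) =====
-- def process(s):
--     out = []
--     for tok in s.replace('\n', ' ').replace(',', ' ').split():
--         buf = []
--         dots = 0
--         for c in tok:
--             if c == '.':
--                 dots += 1
--                 buf.append(c)
--             elif c.isnumeric():
--                 buf.append(c)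
--             elif c == '/' and dots == 3:
--                 break
--         out.append(''.join(buf))
--     return out
-- ===== Notes on version B (the rewrite author's own statement) =====
-- stated objective: faster
-- what changed: A edits the string and each token in place by repeated slice-splicing across three passes (blank delimiters char by char, a dot-counting pass that trims networks at a slash, a pass that blanks every non-dot/non-digit char and then strips the blanks); B normalizes separators with str.replace, splits, and builds each output token in one left-to-right scan that keeps dots and digits and stops once a slash follows the third dot.
import Mathlib
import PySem

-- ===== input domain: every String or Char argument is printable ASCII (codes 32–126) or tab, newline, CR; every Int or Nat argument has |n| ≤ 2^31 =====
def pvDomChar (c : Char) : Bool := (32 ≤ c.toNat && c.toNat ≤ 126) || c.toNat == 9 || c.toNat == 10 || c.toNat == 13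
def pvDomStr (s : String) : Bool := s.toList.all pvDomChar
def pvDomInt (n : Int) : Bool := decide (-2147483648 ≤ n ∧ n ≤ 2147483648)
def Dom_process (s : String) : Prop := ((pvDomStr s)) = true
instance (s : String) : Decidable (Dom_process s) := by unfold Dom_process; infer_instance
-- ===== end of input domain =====

-- B replaces A's three quadratic splice-editing passes by: normalize separators, split, then one
-- linear left-to-right scan per token (keep dots/digits, stop at a slash after the third dot); measured faster.

-- ===== PORT A =====
-- A's inner dot-counting loop: returns (count, idx) — count = -1 means it broke at a '/'
-- seen with three dots counted so far, idx is the index where the loop stopped.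
def pvCountScan : List (Int × Char) → Int → Int → Int × Int
  | [], count, last => (count, last)
  | (idx, k) :: rest, count, _ =>
    let count := if k = '.' then count + 1 else count
    if count = 3 ∧ k = '/' then (-1, idx) else pvCountScan rest count idx

-- `k.isnumeric()` is ported as PySem.Chars.isdigit: exact on the printable-ASCII domain.
-- A's third pass repeatedly reassigns s[index]; the intermediate token is threaded as `cur`.
def process (s : String) : List String :=
  let cs := (PySem.List.enumerate s.toList 0).foldl
    (fun acc p =>
      if p.2 = '\n' ∨ p.2 = ',' then
        PySem.List.slice acc none (some p.1) ++ [' '] ++ PySem.List.slice acc (some (p.1 + 1)) none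
      else acc) s.toList
  let toks := PySem.Chars.split₀ cs
  let toks2 := (PySem.List.enumerate toks 0).foldl
    (fun acc p =>
      let r := pvCountScan (PySem.List.enumerate p.2 0) 0 0
      if r.1 = -1 then acc.set p.1.toNat (PySem.List.slice p.2 none (some r.2)) else acc) toks
  let toks3 := (PySem.List.enumerate toks2 0).foldl
    (fun acc p =>
      let cur := (PySem.List.enumerate p.2 0).foldl
        (fun cur q =>
          if ¬(q.2 = '.' ∨ PySem.Chars.isdigit q.2 = true) then
            PySem.List.slice cur none (some q.1) ++ [' '] ++ PySem.List.slice cur (some (q.1 + 1)) none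
          else cur) p.2
      acc.set p.1.toNat (PySem.Chars.replace cur [' '] [])) toks2
  toks3.map String.mk

-- ===== PORT B =====
-- B's single per-token scan: keep '.' (counting it) and digits, stop at '/' once three
-- dots were seen, skip everything else.  `c.isnumeric()` again = isdigit on ASCII.
def pvScanTok : List Char → Int → List Char → List Char
  | [], _, buf => buf
  | c :: rest, dots, buf =>
    if c = '.' then pvScanTok rest (dots + 1) (buf ++ [c])
    else if PySem.Chars.isdigit c then pvScanTok rest dots (buf ++ [c])
    else if c = '/' ∧ dots = 3 then buf
    else pvScanTok rest dots buf

def process_alt (s : String) : List String :=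
  (PySem.Str.split₀ (PySem.Str.replace (PySem.Str.replace s "\n" " ") "," " ")).map
    (fun tok => String.mk (pvScanTok tok.toList 0 []))

-- ===== PRECONDITION & SPEC =====
def Spec_process (s : String) (out : List String) : Prop := out = process_alt s
instance (s : String) (out : List String) : Decidable (Spec_process s out) := by unfold Spec_process; infer_instance

-- ===== CLAIM (what is proved, stated in full; the proofs are below) =====
def Claim_equal_process : Prop := ∀ (s : String), Dom_process s → Spec_process s (process s)

-- ===== LEMMAS AND PROOFS =====

-- (proof-only helper) the trimmed token: drop everything from a '/' seen with dot-count 3.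
def pvTrim : List Char → Int → List Char
  | [], _ => []
  | c :: rest, count =>
    if c = '/' ∧ count = 3 then []
    else c :: pvTrim rest (count + if c = '.' then 1 else 0)

def pvGood (c : Char) : Bool := c = '.' || PySem.Chars.isdigit c

theorem pv_foldl_enum {α : Type} (F : α → α) (body : List α → Int × α → List α)
    (hbody : ∀ (pre suf : List α) (x : α),
      body (pre ++ x :: suf) ((pre.length : Int), x) = pre ++ F x :: suf) :
    ∀ (xs pre : List α),
      (PySem.List.enumerate xs (pre.length : Int)).foldl body (pre ++ xs) = pre ++ xs.map F := by
  intro xs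
  induction xs with
  | nil => intro pre; simp [PySem.List.enumerate]
  | cons x xs ih =>
    intro pre
    have h1 : ((pre ++ [F x]).length : Int) = (pre.length : Int) + 1 := by
      simp
    have h2 := ih (pre ++ [F x])
    rw [h1] at h2
    simp only [PySem.List.enumerate, List.foldl_cons, hbody]
    have : pre ++ F x :: xs = (pre ++ [F x]) ++ xs := by simp
    rw [this, h2]
    simp

theorem pv_set_append {α : Type} (pre suf : List α) (x v : α) :
    (pre ++ x :: suf).set pre.length v = pre ++ v :: suf := by
  induction pre with
  | nil => simp
  | cons a pre ih => simp [ih]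

theorem pv_replace_go_single (a : Char) (bs : List Char) :
    ∀ (l : List Char) (fuel : Nat) (acc : List Char), l.length ≤ fuel →
      PySem.Chars.replace.go [a] bs fuel l acc
        = acc.reverse ++ l.flatMap (fun c => if c = a then bs else [c]) := by
  intro l
  induction l with
  | nil => intro fuel acc h; cases fuel <;> simp [PySem.Chars.replace.go]
  | cons c t ih =>
    intro fuel acc h
    cases fuel with
    | zero => simp at h
    | succ fuel =>
      simp only [PySem.Chars.replace.go]
      by_cases hc : c = a
      · have hp : [a].isPrefixOf (c :: t) = true := by simp [List.isPrefixOf, hc]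
        rw [if_pos hp]
        simp only [List.length, List.drop_succ_cons, List.drop_zero]
        rw [ih fuel _ (by simpa using h)]
        simp [hc]
      · have hp : [a].isPrefixOf (c :: t) = false := by
          simp [List.isPrefixOf]; exact fun h' => (hc h'.symm).elim
        rw [hp]
        simp only [Bool.false_eq_true, if_false]
        rw [ih fuel _ (by simpa using h)]
        simp [hc]

theorem pv_replace_single (cs : List Char) (a : Char) (bs : List Char) :
    PySem.Chars.replace cs [a] bs = cs.flatMap (fun c => if c = a then bs else [c]) := by
  simp only [PySem.Chars.replace]
  rw [if_neg (by simp)]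
  rw [pv_replace_go_single a bs cs cs.length [] le_rfl]
  simp

theorem pv_replace_single_char (cs : List Char) (a b : Char) :
    PySem.Chars.replace cs [a] [b] = cs.map (fun c => if c = a then b else c) := by
  rw [pv_replace_single]
  induction cs with
  | nil => simp
  | cons c t ih => by_cases hc : c = a <;> simp [hc, ih]

-- A's pass 1 (splice '\n'/',' to ' ') computes the same normalized string as B's two replaces.
theorem pv_pass1 (s : String) :
    (PySem.List.enumerate s.toList 0).foldl
      (fun acc p =>
        if p.2 = '\n' ∨ p.2 = ',' then
          PySem.List.slice acc none (some p.1) ++ [' '] ++ PySem.List.slice acc (some (p.1 + 1)) none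
        else acc) s.toList
    = (PySem.Str.replace (PySem.Str.replace s "\n" " ") "," " ").toList := by
  have hA := pv_foldl_enum (α := Char)
    (fun c => if c = '\n' ∨ c = ',' then ' ' else c)
    (fun acc p =>
      if p.2 = '\n' ∨ p.2 = ',' then
        PySem.List.slice acc none (some p.1) ++ [' '] ++ PySem.List.slice acc (some (p.1 + 1)) none
      else acc)
    (by
      intro pre suf x
      by_cases hx : x = '\n' ∨ x = ','
      · simp only [hx, if_pos]
        rw [PySem.List.slice_to _ (by positivity)]
        rw [PySem.List.slice_from _ (by positivity)]
        have h1 : ((pre.length : Int)).toNat = pre.length := by simp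
        have h2 : ((pre.length : Int) + 1).toNat = pre.length + 1 := by omega
        rw [h1, h2]
        simp [List.drop_append]
      · simp [hx])
    s.toList []
  simp only [List.nil_append, List.length_nil, Nat.cast_zero] at hA
  rw [hA]
  rw [PySem.Str.toList_replace, PySem.Str.toList_replace]
  have h1 : ("\n" : String).toList = ['\n'] := by decide
  have h2 : (" " : String).toList = [' '] := by decide
  have h3 : ("," : String).toList = [','] := by decide
  rw [h1, h2, h3, pv_replace_single_char, pv_replace_single_char, List.map_map]
  apply List.map_congr_left
  intro c _
  by_cases hn : c = '\n' <;> by_cases hm : c = ',' <;> simp [hn, hm]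

-- pvCountScan characterizes pvTrim: A's trim-at-slash pass yields pvTrim.
theorem pv_countScan_break_ge :
    ∀ (cs : List Char) (n count last : Int), 0 ≤ count →
      (pvCountScan (PySem.List.enumerate cs n) count last).1 = -1 →
      n ≤ (pvCountScan (PySem.List.enumerate cs n) count last).2 := by
  intro cs
  induction cs with
  | nil =>
    intro n count last h hb
    simp only [PySem.List.enumerate, pvCountScan] at hb
    omega
  | cons c t ih =>
    intro n count last h hb
    simp only [PySem.List.enumerate, pvCountScan] at hb ⊢
    by_cases hbr : (if c = '.' then count + 1 else count) = 3 ∧ c = '/'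
    · rw [if_pos hbr]
    · rw [if_neg hbr] at hb ⊢
      have := ih (n + 1) _ n (by split <;> omega) hb
      omega

theorem pv_trim_eq :
    ∀ (cs : List Char) (n count last : Int), 0 ≤ count →
      (if (pvCountScan (PySem.List.enumerate cs n) count last).1 = -1
       then PySem.List.slice cs none (some ((pvCountScan (PySem.List.enumerate cs n) count last).2 - n))
       else cs) = pvTrim cs count := by
  intro cs
  induction cs with
  | nil =>
    intro n count last hc
    simp only [PySem.List.enumerate, pvCountScan, pvTrim]
    rw [if_neg (by omega)]
  | cons c t ih =>
    intro n count last hc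
    simp only [PySem.List.enumerate, pvCountScan, pvTrim]
    by_cases hbr : (if c = '.' then count + 1 else count) = 3 ∧ c = '/'
    · have hslash : c = '/' := hbr.2
      have hcnt : count = 3 := by
        have : (if c = '.' then count + 1 else count) = count := by
          rw [if_neg (by rw [hslash]; decide)]
        rw [this] at hbr; exact hbr.1
      rw [if_pos hbr, if_pos ((⟨hslash, hcnt⟩ : c = '/' ∧ count = 3))]
      simp [PySem.List.slice_to _ (le_refl (0:Int)) ]
    · rw [if_neg hbr]
      have hpt : ¬(c = '/' ∧ count = 3) := by
        intro ⟨h1, h2⟩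
        exact hbr ⟨by rw [if_neg (by rw [h1]; decide)]; exact h2, h1⟩
      rw [if_neg hpt]
      have hcnt' : (0:Int) ≤ (if c = '.' then count + 1 else count) := by
        split <;> omega
      have key := ih (n + 1) (if c = '.' then count + 1 else count) n hcnt'
      by_cases hb : (pvCountScan (PySem.List.enumerate t (n+1)) (if c = '.' then count + 1 else count) n).1 = -1
      · have hge := pv_countScan_break_ge t (n+1) (if c = '.' then count + 1 else count) n hcnt' hb
        rw [if_pos hb] at key ⊢
        rw [PySem.List.slice_to _ (by omega)] at key ⊢
        have harith : ((pvCountScan (PySem.List.enumerate t (n+1)) (if c = '.' then count + 1 else count) n).2 - n).toNat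
            = ((pvCountScan (PySem.List.enumerate t (n+1)) (if c = '.' then count + 1 else count) n).2 - (n+1)).toNat + 1 := by
          omega
        rw [harith, List.take_succ_cons, key]
        have hinc : count + (if c = '.' then (1:Int) else 0) = (if c = '.' then count + 1 else count) := by
          split <;> ring
        rw [hinc]
      · rw [if_neg hb] at key ⊢
        have hinc : count + (if c = '.' then (1:Int) else 0) = (if c = '.' then count + 1 else count) := by
          split <;> ring
        rw [hinc]
        exact congrArg (c :: ·) key

-- A's pass-3 body (blank bad chars, strip spaces) is filtering by pvGood.
theorem pv_blank_eq_map (tok : List Char) :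
    (PySem.List.enumerate tok 0).foldl
      (fun cur q =>
        if ¬(q.2 = '.' ∨ PySem.Chars.isdigit q.2 = true) then
          PySem.List.slice cur none (some q.1) ++ [' '] ++ PySem.List.slice cur (some (q.1 + 1)) none
        else cur) tok
    = tok.map (fun k => if ¬(k = '.' ∨ PySem.Chars.isdigit k = true) then ' ' else k) := by
  have h := pv_foldl_enum (α := Char)
    (fun k => if ¬(k = '.' ∨ PySem.Chars.isdigit k = true) then ' ' else k)
    (fun cur q =>
      if ¬(q.2 = '.' ∨ PySem.Chars.isdigit q.2 = true) then
        PySem.List.slice cur none (some q.1) ++ [' '] ++ PySem.List.slice cur (some (q.1 + 1)) none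
      else cur)
    (by
      intro pre suf x
      by_cases hx : x = '.' ∨ PySem.Chars.isdigit x = true
      · simp [hx]
      · simp only [hx, not_false_iff, if_pos]
        rw [PySem.List.slice_to _ (by positivity), PySem.List.slice_from _ (by positivity)]
        have h1 : ((pre.length : Int)).toNat = pre.length := by simp
        have h2 : ((pre.length : Int) + 1).toNat = pre.length + 1 := by omega
        rw [h1, h2]
        simp [List.drop_append])
    tok []
  simpa using h

theorem pv_good_ne_space {c : Char} (h : pvGood c = true) : c ≠ ' ' := by
  intro hc
  subst hc
  simp [pvGood, PySem.Chars.isdigit] at h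

theorem pv_filter_eq (tok : List Char) :
    PySem.Chars.replace
      (tok.map (fun k => if ¬(k = '.' ∨ PySem.Chars.isdigit k = true) then ' ' else k)) [' '] []
    = tok.filter pvGood := by
  rw [pv_replace_single]
  induction tok with
  | nil => simp
  | cons c t ih =>
    by_cases hc : c = '.' ∨ PySem.Chars.isdigit c = true
    · have hg : pvGood c = true := by
        rcases hc with h | h
        · simp [pvGood, h]
        · simp [pvGood, h]
      simp only [List.map_cons, hc, not_true_eq_false, if_false, List.flatMap_cons,
        List.filter_cons, hg]
      rw [if_neg (pv_good_ne_space hg), ih]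
      simp
    · have hg : pvGood c = false := by
        simp only [pvGood, Bool.or_eq_false_iff]
        constructor
        · simp only [decide_eq_false_iff_not]; intro h; exact hc (Or.inl h)
        · cases hdi : PySem.Chars.isdigit c
          · rfl
          · exact absurd (Or.inr hdi) hc
      rw [List.map_cons, List.flatMap_cons, List.filter_cons, hg]
      have hmap : (if ¬(c = '.' ∨ PySem.Chars.isdigit c = true) then ' ' else c) = ' ' := if_pos hc
      rw [hmap, if_pos rfl, List.nil_append, ih]
      simp

-- B's scan computes (buf ++) the pvGood-filter of the trimmed token.
theorem pv_scan_eq :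
    ∀ (cs : List Char) (dots : Int) (buf : List Char),
      pvScanTok cs dots buf = buf ++ (pvTrim cs dots).filter pvGood := by
  intro cs
  induction cs with
  | nil => intro dots buf; simp [pvScanTok, pvTrim]
  | cons c t ih =>
    intro dots buf
    by_cases hdot : c = '.'
    · have hpt : ¬(c = '/' ∧ dots = 3) := by rintro ⟨h, -⟩; rw [hdot] at h; cases h
      simp only [pvScanTok, pvTrim, hdot, if_pos]
      rw [ih]
      simp [pvGood]
    · by_cases hdig : PySem.Chars.isdigit c = true
      · have hpt : ¬(c = '/' ∧ dots = 3) := by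
          rintro ⟨h, -⟩; rw [h] at hdig; simp [PySem.Chars.isdigit] at hdig
        simp only [pvScanTok, pvTrim, hdot, if_false, hdig, if_neg hpt]
        rw [ih]
        have hg : pvGood c = true := by simp [pvGood, hdig]
        simp [hg]
      · by_cases hbr : c = '/' ∧ dots = 3
        · simp only [pvScanTok, pvTrim, hdot, if_false, hdig, if_pos hbr]
          simp
        · have hg : pvGood c = false := by
            simp only [pvGood, Bool.or_eq_false_iff]
            exact ⟨by simpa using hdot, by simpa using hdig⟩
          have h1 : pvScanTok (c :: t) dots buf = pvScanTok t dots buf := by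
            simp [pvScanTok, hdot, hdig, hbr]
          have h2 : pvTrim (c :: t) dots = c :: pvTrim t dots := by
            simp [pvTrim, hbr, hdot]
          rw [h1, h2, List.filter_cons, if_neg (by simp [hg]), ih]

-- ===== VERDICT (by name: the statement is the Claim_ definition above) =====
theorem process_spec : Claim_equal_process := by
  intro s _
  unfold Spec_process process process_alt
  dsimp only
  rw [pv_pass1]
  set s' := PySem.Str.replace (PySem.Str.replace s "\n" " ") "," " " with hs'
  -- pass 2 = map pvTrim over the tokens
  have htrimF : ∀ (x : List Char),
      (let r := pvCountScan (PySem.List.enumerate x 0) 0 0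
       if r.1 = -1 then PySem.List.slice x none (some r.2) else x) = pvTrim x 0 := by
    intro x
    have := pv_trim_eq x 0 0 0 (le_refl 0)
    simpa using this
  have h2 := pv_foldl_enum (α := List Char) (fun x => pvTrim x 0)
    (fun acc p =>
      let r := pvCountScan (PySem.List.enumerate p.2 0) 0 0
      if r.1 = -1 then acc.set p.1.toNat (PySem.List.slice p.2 none (some r.2)) else acc)
    (by
      intro pre suf x
      simp only []
      by_cases hb : (pvCountScan (PySem.List.enumerate x 0) 0 0).1 = -1
      · rw [if_pos hb]
        have h1 : ((pre.length : Int)).toNat = pre.length := by simp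
        rw [h1, pv_set_append]
        have := htrimF x
        rw [if_pos hb] at this
        rw [this]
      · rw [if_neg hb]
        have := htrimF x
        rw [if_neg hb] at this
        rw [← this])
    (PySem.Chars.split₀ s'.toList) []
  simp only [List.nil_append, List.length_nil, Nat.cast_zero] at h2
  rw [h2]
  -- pass 3 = map (filter pvGood ∘ …) over the tokens
  have h3 := pv_foldl_enum (α := List Char)
    (fun x => PySem.Chars.replace
      ((PySem.List.enumerate x 0).foldl
        (fun cur q =>
          if ¬(q.2 = '.' ∨ PySem.Chars.isdigit q.2 = true) then
            PySem.List.slice cur none (some q.1) ++ [' '] ++ PySem.List.slice cur (some (q.1 + 1)) none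
          else cur) x) [' '] [])
    (fun acc p =>
      let cur := (PySem.List.enumerate p.2 0).foldl
        (fun cur q =>
          if ¬(q.2 = '.' ∨ PySem.Chars.isdigit q.2 = true) then
            PySem.List.slice cur none (some q.1) ++ [' '] ++ PySem.List.slice cur (some (q.1 + 1)) none
          else cur) p.2
      acc.set p.1.toNat (PySem.Chars.replace cur [' '] []))
    (by
      intro pre suf x
      simp only []
      have h1 : ((pre.length : Int)).toNat = pre.length := by simp
      rw [h1, pv_set_append])
    ((PySem.Chars.split₀ s'.toList).map (fun x => pvTrim x 0)) []
  simp only [List.nil_append, List.length_nil, Nat.cast_zero] at h3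
  rw [h3]
  -- now both sides are maps over the same token list
  have hsplit : PySem.Chars.split₀ s'.toList = (PySem.Str.split₀ s').map String.toList := by
    rw [PySem.Str.split₀_map_toList]
  rw [hsplit]
  simp only [List.map_map]
  apply List.map_congr_left
  intro tok _
  simp only [Function.comp]
  rw [pv_blank_eq_map, pv_filter_eq, pv_scan_eq]
  simp
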